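-- pv_equiv track=rewrite | github.com/eisbaerBorealis/personal | learning/advent-of-code/2021/015-chitons.py | getFullMap
-- ===== SOURCE A (Python) =====
-- def getFullMap(map):
--     fullMap = []
--     for line in map:
--         fullMap.append([num for num in line])
--
--     h = len(map)
--     l = len(map[0])
--
--     # for i in range(8):
--     for i in range(4):
--         # if i < 4: # 0-3
--             for j in range(h):
--                 newLine = [(num % 9) + 1 for num in fullMap[i * h + j]]
--                 fullMap.append([num for num in newLine])
--                 for k in range(i + 1): # 0-(0-3)
--                     fullMap[k * h + j] += [num for num in newLine]
--         # else: # 4-7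
--         #     pass
--
--     for i in range(4):
--         for j in range(h):
--             newLine = [(num % 9) + 1 for num in fullMap[4 * h + j][0-l:]]
--             fullMap[4 * h + j] += [num for num in newLine]
--             for k in range(3 - i): # 0-(3-0)
--                 fullMap[(k + 1 + i) * h + j] += [num for num in newLine]
--
--     return fullMap
-- ===== SOURCE B (Python) =====
-- def getFullMap(map):
--     # Per-source-row derivation, no shared growing buffer:
--     # each output row m*h+j is the concatenation of the vertical tiles m..4 of
--     # source row j followed by the first m "tails" of that row (the tails are
--     # produced by repeatedly incrementing the last-l window of the bottom strip).
--     l = len(map[0])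
--     out = []
--     for m in range(5):
--         for row in map:
--             t = list(row)
--             tiles = [t]
--             for _ in range(4):
--                 t = [(v % 9) + 1 for v in t]
--                 tiles.append(t)
--             s = list(t)
--             tails = []
--             for _ in range(4):
--                 nl = [(v % 9) + 1 for v in s[-l:]]
--                 tails.append(nl)
--                 s = s + nl
--             new = []
--             for x in tiles[m:]:
--                 new = new + x
--             for x in tails[:m]:
--                 new = new + x
--             out.append(new)
--     return out
-- ===== Notes on version B (the rewrite author's own statement) =====
-- stated objective: alternative
-- what changed: A fills the 5x5 map in two global phases of in-place extensions of one shared growing buffer addressed by k*h+j index arithmetic; B computes each output row locally from its source row alone (the five incremented vertical tiles followed by the row's last-l-window tails) and appends the rows in order, with no shared mutable state.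
import Mathlib
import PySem

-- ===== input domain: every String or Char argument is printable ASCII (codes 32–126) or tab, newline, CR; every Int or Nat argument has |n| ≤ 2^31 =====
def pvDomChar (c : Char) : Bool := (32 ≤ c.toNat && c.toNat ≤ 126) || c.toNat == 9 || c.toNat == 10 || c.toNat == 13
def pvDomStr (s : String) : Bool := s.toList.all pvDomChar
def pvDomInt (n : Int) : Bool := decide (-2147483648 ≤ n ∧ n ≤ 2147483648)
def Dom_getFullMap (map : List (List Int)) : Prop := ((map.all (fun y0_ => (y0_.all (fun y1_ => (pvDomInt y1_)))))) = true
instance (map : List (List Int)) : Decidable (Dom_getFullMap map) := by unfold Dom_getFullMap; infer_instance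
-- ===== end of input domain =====

-- B replaces A's two global phases of in-place extensions of one shared index-addressed buffer
-- by a per-source-row construction: each output row is built locally from the row's five
-- incremented vertical tiles and its last-l-window tails; objective: alternative (same cost).

-- ===== PORT A =====
-- inner body of A's first loop nest (i over range 4, j over range h)
def pvA_inner1 (h i : Nat) (fm : List (List Int)) (j : Nat) : List (List Int) :=
  let newLine := (fm.getD (i*h+j) []).map (fun num => PySem.Int.mod num 9 + 1)
  let fm := fm ++ [newLine.map (fun num => num)]
  (List.range (i+1)).foldl (fun fm k =>
    fm.modify (k*h+j) (fun row => row ++ newLine.map (fun num => num))) fm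

-- inner body of A's second loop nest
def pvA_inner2 (h l i : Nat) (fm : List (List Int)) (j : Nat) : List (List Int) :=
  let newLine := (PySem.List.slice (fm.getD (4*h+j) []) (some (0 - (l:Int))) none).map
    (fun num => PySem.Int.mod num 9 + 1)
  let fm := fm.modify (4*h+j) (fun row => row ++ newLine.map (fun num => num))
  (List.range (3-i)).foldl (fun fm k =>
    fm.modify ((k+1+i)*h+j) (fun row => row ++ newLine.map (fun num => num))) fm

def getFullMap (map : List (List Int)) : List (List Int) :=
  let fullMap : List (List Int) := map.foldl (fun acc line => acc ++ [line.map (fun num => num)]) []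
  let h := map.length
  let l := (PySem.List.pyGetD map 0 ([] : List Int)).length
  let fullMap := (List.range 4).foldl (fun fm i => (List.range h).foldl (pvA_inner1 h i) fm) fullMap
  (List.range 4).foldl (fun fm i => (List.range h).foldl (pvA_inner2 h l i) fm) fullMap

-- ===== PORT B =====
-- one output row: the vertical tiles m..4 of `row`, then the first m tails of its bottom strip
def pvB_row (l m : Nat) (row : List Int) : List Int :=
  let t := row.map (fun v => v)
  let p1 := (List.range 4).foldl (fun (p : List (List Int) × List Int) _ =>
      let t := p.2.map (fun v => PySem.Int.mod v 9 + 1)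
      (p.1 ++ [t], t)) ([t], t)
  let tiles := p1.1
  let s := p1.2.map (fun v => v)
  let p2 := (List.range 4).foldl (fun (p : List (List Int) × List Int) _ =>
      let nl := (PySem.List.slice p.2 (some (0 - (l:Int))) none).map (fun v => PySem.Int.mod v 9 + 1)
      (p.1 ++ [nl], p.2 ++ nl)) (([] : List (List Int)), s)
  let tails := p2.1
  let new := (PySem.List.slice tiles (some ((m:Nat):Int)) none).foldl (fun new x => new ++ x) []
  (PySem.List.slice tails none (some ((m:Nat):Int))).foldl (fun new x => new ++ x) new

def getFullMap_alt (map : List (List Int)) : List (List Int) :=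
  let l := (PySem.List.pyGetD map 0 ([] : List Int)).length
  (List.range 5).foldl (fun out m =>
    map.foldl (fun out row => out ++ [pvB_row l m row]) out) []

-- ===== PRECONDITION & SPEC =====
-- Pre_ excludes only the empty grid, on which A (and B alike) raises IndexError at map[0].
def Pre_getFullMap (map : List (List Int)) : Prop := map ≠ []
instance (map : List (List Int)) : Decidable (Pre_getFullMap map) := by
  unfold Pre_getFullMap; infer_instance

def pvWitness_getFullMap : List (List Int) := [[1, 2], [3, 4]]

def Spec_getFullMap (map : List (List Int)) (out : List (List Int)) : Prop := out = getFullMap_alt map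
instance (map : List (List Int)) (out : List (List Int)) : Decidable (Spec_getFullMap map out) := by
  unfold Spec_getFullMap; infer_instance

-- ===== CLAIM (what is proved, stated in full; the proofs are below) =====
def Claim_equal_getFullMap : Prop := ∀ (map : List (List Int)), Dom_getFullMap map → Pre_getFullMap map → Spec_getFullMap map (getFullMap map)

-- ===== LEMMAS AND PROOFS =====

-- the cell transform f(v) = v % 9 + 1 and its t-fold iterate on a row
def pvF (num : Int) : Int := PySem.Int.mod num 9 + 1
def gIter : Nat → List Int → List Int
  | 0, r => r
  | t+1, r => (gIter t r).map pvF
-- segment of an output row: tiles t = a, a+1, …, a+b-1 of source row r, concatenated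
def seg (a b : Nat) (r : List Int) : List Int := ((List.range' a b).map (fun t => gIter t r)).flatten
-- concatenation of blocks bf a, bf (a+1), …, bf (a+b-1) (each block = h rows of the buffer)
def catB (a b : Nat) (bf : Nat → List (List Int)) : List (List Int) := ((List.range' a b).map bf).flatten

theorem seg_one (a : Nat) (r : List Int) : seg a 1 r = gIter a r := by
  simp [seg, List.range']

theorem seg_concat (a b : Nat) (r : List Int) : seg a (b+1) r = seg a b r ++ gIter (a+b) r := by
  simp [seg, List.range'_concat]

theorem catB_cons (a b : Nat) (bf : Nat → List (List Int)) :
    catB a (b+1) bf = bf a ++ catB (a+1) b bf := by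
  simp [catB, List.range'_succ]

theorem catB_concat (a b : Nat) (bf : Nat → List (List Int)) :
    catB a (b+1) bf = catB a b bf ++ bf (a+b) := by
  simp [catB, List.range'_concat]

theorem catB_congr (a b : Nat) (bf bf' : Nat → List (List Int))
    (hf : ∀ k, a ≤ k → k < a+b → bf k = bf' k) : catB a b bf = catB a b bf' := by
  induction b generalizing a with
  | zero => rfl
  | succ b ih =>
    rw [catB_cons, catB_cons, hf a (le_refl a) (by omega),
      ih (a+1) (fun k h1 h2 => hf k (by omega) (by omega))]

theorem modify_append_left {α : Type} (l t : List α) (n : Nat) (f : α → α) (h : n < l.length) :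
    (l ++ t).modify n f = l.modify n f ++ t := by
  induction l generalizing n with
  | nil => simp at h
  | cons x xs ih =>
    cases n with
    | zero => simp [List.modify_zero_cons]
    | succ n => simp only [List.cons_append, List.modify_succ_cons]
                rw [ih n (by simpa using h)]

theorem modify_append_right {α : Type} (l t : List α) (n : Nat) (f : α → α) :
    (l ++ t).modify (l.length + n) f = l ++ t.modify n f := by
  induction l with
  | nil => simp
  | cons x xs ih =>
    simp only [List.cons_append, List.length_cons]
    rw [show xs.length + 1 + n = (xs.length + n) + 1 by omega, List.modify_succ_cons, ih]

theorem catB_getD (a b h j k : Nat) (bf : Nat → List (List Int)) (rest : List (List Int))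
    (hlen : ∀ t, a ≤ t → t < a+b → (bf t).length = h) (hk : k < b) (hj : j < h) :
    (catB a b bf ++ rest).getD (k*h+j) [] = (bf (a+k)).getD j [] := by
  induction k generalizing a b with
  | zero =>
    cases b with
    | zero => omega
    | succ b =>
      rw [catB_cons, List.append_assoc, Nat.zero_mul, Nat.zero_add]
      rw [List.getD_append _ _ _ _ (by rw [hlen a (le_refl a) (by omega)]; omega)]
      simp
  | succ k ih =>
    cases b with
    | zero => omega
    | succ b =>
      rw [catB_cons, List.append_assoc]
      have hl : (bf a).length = h := hlen a (le_refl a) (by omega)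
      rw [show (k+1)*h+j = (bf a).length + (k*h+j) by rw [hl]; ring]
      rw [List.getD_append_right _ _ _ _ (by omega), Nat.add_sub_cancel_left]
      rw [show a + (k+1) = (a+1) + k by omega]
      exact ih (a+1) b (fun t h1 h2 => hlen t (by omega) (by omega)) (by omega)

theorem catB_modify (a b h j k : Nat) (bf : Nat → List (List Int)) (rest : List (List Int))
    (f : List Int → List Int)
    (hlen : ∀ t, a ≤ t → t < a+b → (bf t).length = h) (hk : k < b) (hj : j < h) :
    (catB a b bf ++ rest).modify (k*h+j) f =
      catB a b (fun t => if t = a+k then (bf t).modify j f else bf t) ++ rest := by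
  induction k generalizing a b with
  | zero =>
    cases b with
    | zero => omega
    | succ b =>
      rw [catB_cons, List.append_assoc, Nat.zero_mul, Nat.zero_add]
      rw [modify_append_left _ _ _ _ (by rw [hlen a (le_refl a) (by omega)]; omega)]
      conv_rhs => rw [catB_cons]
      simp only [Nat.add_zero, if_true]
      rw [List.append_assoc]
      congr 2
      apply catB_congr
      intro t h1 h2
      rw [if_neg (by omega)]
  | succ k ih =>
    cases b with
    | zero => omega
    | succ b =>
      rw [catB_cons, List.append_assoc]
      have hl : (bf a).length = h := hlen a (le_refl a) (by omega)
      rw [show (k+1)*h+j = (bf a).length + (k*h+j) by rw [hl]; ring]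
      rw [modify_append_right]
      rw [ih (a+1) b (fun t h1 h2 => hlen t (by omega) (by omega)) (by omega)]
      conv_rhs => rw [catB_cons]
      rw [if_neg (show ¬ a = a + (k+1) by omega), List.append_assoc]
      congr 2
      apply catB_congr
      intro t h1 h2
      rw [show a + 1 + k = a + (k+1) by omega]

-- fold of modifies at blocks o, o+1, …, o+m-1, row j of each
theorem fold_mod (m o c h j : Nat) (bf : Nat → List (List Int)) (rest : List (List Int))
    (f : List Int → List Int)
    (hlen : ∀ t, t < c → (bf t).length = h) (hm : o + m ≤ c) (hj : j < h) :
    (List.range m).foldl (fun S k => S.modify ((k+o)*h+j) f) (catB 0 c bf ++ rest) =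
      catB 0 c (fun t => if o ≤ t ∧ t < o+m then (bf t).modify j f else bf t) ++ rest := by
  induction m generalizing bf with
  | zero =>
    simp only [List.range_zero, List.foldl_nil]
    congr 1
    apply catB_congr
    intro t h1 h2
    rw [if_neg (by omega)]
  | succ m ih =>
    rw [List.range_succ, List.foldl_concat]
    rw [ih bf hlen (by omega)]
    rw [catB_modify 0 c h j (m+o) _ rest f
      (fun t h1 h2 => by
        by_cases hc : o ≤ t ∧ t < o+m
        · rw [if_pos hc, List.length_modify]; exact hlen t (by omega)
        · rw [if_neg hc]; exact hlen t (by omega))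
      (by omega) hj]
    congr 1
    apply catB_congr
    intro t h1 h2
    by_cases he : t = m + o
    · rw [if_pos (by omega), if_neg (by omega), if_pos (by omega), he]
    · rw [if_neg (by omega)]
      by_cases hc : o ≤ t ∧ t < o+m
      · rw [if_pos hc, if_pos (by omega)]
      · rw [if_neg hc, if_neg (by omega)]

-- modifying row j (j < number of source rows) of a block given in take/drop form
theorem block_modify (map : List (List Int)) (j : Nat) (hj : j < map.length)
    (p q : List Int → List Int) (f : List Int → List Int) :
    ((map.take j).map p ++ (map.drop j).map q).modify j f =
      (map.take j).map p ++ (f (q (map[j]'hj)) :: (map.drop (j+1)).map q) := by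
  have hT : ((map.take j).map p).length = j := by
    simp [List.length_take]; omega
  have h2 := modify_append_right ((map.take j).map p) ((map.drop j).map q) 0 f
  rw [hT, Nat.add_zero] at h2
  rw [h2]
  congr 1
  simp only [List.drop_eq_getElem_cons hj, List.map_cons, List.modify_zero_cons]

theorem block_getD (map : List (List Int)) (j : Nat) (hj : j < map.length)
    (p q : List Int → List Int) :
    ((map.take j).map p ++ (map.drop j).map q).getD j [] = q (map[j]'hj) := by
  have hT : ((map.take j).map p).length = j := by
    simp [List.length_take]; omega
  rw [List.getD_append_right _ _ _ _ (by omega), hT, Nat.sub_self]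
  simp only [List.drop_eq_getElem_cons hj, List.map_cons, List.getD_cons_zero]

theorem take_succ_map {α β : Type} (map : List α) (j : Nat) (hj : j < map.length) (p : α → β) :
    (map.take (j+1)).map p = (map.take j).map p ++ [p (map[j]'hj)] := by
  have h1 : map.take (j+1) = map.take j ++ map[j]?.toList := List.take_succ
  rw [h1, List.map_append]
  simp [List.getElem?_eq_getElem hj]

theorem map_take_drop {α β : Type} (map : List α) (j : Nat) (q : α → β) :
    (map.take j).map q ++ (map.drop j).map q = map.map q := by
  rw [← List.map_append, List.take_append_drop]

-- state of the buffer in A's FIRST loop nest, outer index i, inner index j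
def bf1 (map : List (List Int)) (i j : Nat) : Nat → List (List Int) := fun k =>
  (map.take j).map (seg k (i+2-k)) ++ (map.drop j).map (seg k (i+1-k))
def st1 (map : List (List Int)) (i j : Nat) : List (List Int) :=
  catB 0 (i+1) (bf1 map i j) ++ (map.take j).map (fun r => seg (i+1) 1 r)

theorem bf1_len (map : List (List Int)) (i j k : Nat) (hj : j ≤ map.length) :
    (bf1 map i j k).length = map.length := by
  simp [bf1, List.length_take]
  omega

theorem st1_step (map : List (List Int)) (i j : Nat) (hj : j < map.length) :
    pvA_inner1 map.length i (st1 map i j) j = st1 map i (j+1) := by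
  have hbl : ∀ t, 0 ≤ t → t < 0+(i+1) → (bf1 map i j t).length = map.length :=
    fun t _ _ => bf1_len map i j t (by omega)
  have hread : (st1 map i j).getD (i*map.length+j) [] = gIter i (map[j]'hj) := by
    unfold st1
    rw [catB_getD 0 (i+1) map.length j i _ _ hbl (by omega) hj]
    simp only [Nat.zero_add]
    unfold bf1
    rw [block_getD map j hj]
    rw [show i+1-i = 1 from by omega, seg_one]
  simp only [pvA_inner1]
  rw [hread]
  have hnl : (gIter i (map[j]'hj)).map (fun num => PySem.Int.mod num 9 + 1) =
      gIter (i+1) (map[j]'hj) := rfl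
  rw [hnl]
  simp only [List.map_id']
  unfold st1
  rw [List.append_assoc]
  have hfeq : (fun (fm : List (List Int)) k =>
        fm.modify (k*map.length+j) (fun row => row ++ gIter (i+1) (map[j]'hj))) =
      (fun (fm : List (List Int)) k =>
        fm.modify ((k+0)*map.length+j) (fun row => row ++ gIter (i+1) (map[j]'hj))) := by
    funext fm k
    simp
  rw [hfeq]
  rw [fold_mod (i+1) 0 (i+1) map.length j _ _ _ (fun t ht => bf1_len map i j t (by omega))
    (by omega) hj]
  congr 1
  · apply catB_congr
    intro t _ ht2
    rw [if_pos (by omega)]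
    unfold bf1
    rw [block_modify map j hj]
    rw [take_succ_map map j hj (seg t (i+2-t)), List.append_assoc, List.singleton_append]
    congr 2
    rw [show i+2-t = (i+1-t)+1 from by omega, seg_concat,
      show t + (i+1-t) = i+1 from by omega]
  · rw [take_succ_map map j hj, ← seg_one (i+1)]

theorem loop1_iter (map : List (List Int)) (i : Nat) :
    (List.range map.length).foldl (pvA_inner1 map.length i) (st1 map i 0) = st1 map i map.length := by
  rw [List.range_eq_range']
  suffices h : ∀ c j, j + c = map.length →
      (List.range' j c).foldl (pvA_inner1 map.length i) (st1 map i j) = st1 map i map.length by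
    exact h map.length 0 (by omega)
  intro c
  induction c with
  | zero => intro j hjc; rw [show j = map.length from by omega]; rfl
  | succ c ih =>
    intro j hjc
    rw [List.range'_succ, List.foldl_cons, st1_step map i j (by omega)]
    exact ih (j+1) (by omega)

theorem st1_init (map : List (List Int)) : st1 map 0 0 = map := by
  simp only [st1, bf1, catB, List.range', List.map_cons, List.map_nil, List.flatten,
    List.take_zero, List.drop_zero, List.append_nil, List.nil_append]
  rw [show seg 0 (0+1-0) = (fun (r : List Int) => r) from funext fun r => seg_one 0 r]
  simp [List.map_id']

theorem st1_trans (map : List (List Int)) (i : Nat) : st1 map i map.length = st1 map (i+1) 0 := by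
  unfold st1 bf1
  simp only [List.take_length, List.drop_length, List.take_zero, List.drop_zero,
    List.map_nil, List.append_nil, List.nil_append]
  conv_rhs => rw [catB_concat]
  congr 1
  apply List.map_congr_left
  intro r _
  rw [Nat.zero_add, show i+1+1-(i+1) = 1 from by omega]

-- the tails machinery of A's SECOND loop nest: bottom strip s and its appended last-l windows
def sIter (l : Nat) (r : List Int) : Nat → List Int
  | 0 => gIter 4 r
  | i+1 => sIter l r i ++ (PySem.List.slice (sIter l r i) (some (0 - (l:Int))) none).map pvF
def nlF (l : Nat) (r : List Int) (i : Nat) : List Int :=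
  (PySem.List.slice (sIter l r i) (some (0 - (l:Int))) none).map pvF
-- first n tails, concatenated
def tcat (l : Nat) (r : List Int) (n : Nat) : List Int := ((List.range n).map (nlF l r)).flatten

theorem tcat_succ (l : Nat) (r : List Int) (n : Nat) :
    tcat l r (n+1) = tcat l r n ++ nlF l r n := by
  simp [tcat, List.range_succ]

theorem sIter_eq (l : Nat) (r : List Int) (i : Nat) :
    sIter l r i = gIter 4 r ++ tcat l r i := by
  induction i with
  | zero => simp [sIter, tcat]
  | succ i ih =>
    show sIter l r i ++ nlF l r i = _
    rw [ih, tcat_succ, List.append_assoc]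

-- state of the buffer in A's SECOND loop nest
def bf2 (map : List (List Int)) (l i j : Nat) : Nat → List (List Int) := fun m =>
  (map.take j).map (fun r => seg m (5-m) r ++ tcat l r (min i m + if i+1 ≤ m then 1 else 0)) ++
  (map.drop j).map (fun r => seg m (5-m) r ++ tcat l r (min i m))
def st2 (map : List (List Int)) (l i j : Nat) : List (List Int) := catB 0 5 (bf2 map l i j)

theorem bf2_len (map : List (List Int)) (l i j m : Nat) (hj : j ≤ map.length) :
    (bf2 map l i j m).length = map.length := by
  simp [bf2, List.length_take]
  omega

theorem st2_step (map : List (List Int)) (l i j : Nat) (hi : i ≤ 3) (hj : j < map.length) :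
    pvA_inner2 map.length l i (st2 map l i j) j = st2 map l i (j+1) := by
  have hbl : ∀ t, 0 ≤ t → t < 0+5 → (bf2 map l i j t).length = map.length :=
    fun t _ _ => bf2_len map l i j t (by omega)
  have hread : (st2 map l i j).getD (4*map.length+j) [] = sIter l (map[j]'hj) i := by
    unfold st2
    rw [← List.append_nil (catB 0 5 (bf2 map l i j))]
    rw [catB_getD 0 5 map.length j 4 _ _ hbl (by omega) hj]
    simp only [Nat.zero_add]
    unfold bf2
    rw [block_getD map j hj]
    rw [show min i 4 = i from by omega, sIter_eq]
    rw [show (5:Nat)-4 = 1 from by omega, seg_one]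
  have hnl : (PySem.List.slice (sIter l (map[j]'hj) i) (some (0 - (l:Int))) none).map
      (fun num => PySem.Int.mod num 9 + 1) = nlF l (map[j]'hj) i := rfl
  simp only [pvA_inner2]
  rw [hread, hnl]
  simp only [List.map_id']
  unfold st2
  rw [← List.append_nil (catB 0 5 (bf2 map l i j))]
  rw [catB_modify 0 5 map.length j 4 _ _ _ hbl (by omega) hj]
  have hfeq : (fun (fm : List (List Int)) k =>
        fm.modify ((k+1+i)*map.length+j) (fun row => row ++ nlF l (map[j]'hj) i)) =
      (fun (fm : List (List Int)) k =>
        fm.modify ((k+(i+1))*map.length+j) (fun row => row ++ nlF l (map[j]'hj) i)) := by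
    funext fm k
    rw [show k+1+i = k+(i+1) from by omega]
  rw [hfeq]
  rw [fold_mod (3-i) (i+1) 5 map.length j _ _ _
    (fun t ht5 => by
      by_cases h4 : t = 0+4
      · rw [if_pos h4, List.length_modify]; exact bf2_len map l i j t (by omega)
      · rw [if_neg h4]; exact bf2_len map l i j t (by omega))
    (by omega) hj]
  rw [List.append_nil]
  apply catB_congr
  intro t _ ht5
  by_cases hle : t ≤ i
  · rw [if_neg (by omega), if_neg (by omega)]
    unfold bf2
    rw [if_neg (show ¬(i+1 ≤ t) from by omega), Nat.add_zero, map_take_drop, map_take_drop]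
  · have hmod : (bf2 map l i j t).modify j (fun row => row ++ nlF l (map[j]'hj) i) =
        bf2 map l i (j+1) t := by
      unfold bf2
      rw [if_pos (show i+1 ≤ t from by omega)]
      rw [block_modify map j hj]
      rw [take_succ_map map j hj]
      conv_rhs => rw [List.append_assoc, List.singleton_append]
      congr 2
      rw [List.append_assoc, show min i t = i from by omega, ← tcat_succ]
    by_cases h4 : t = 4
    · rw [if_neg (by omega), if_pos (by omega), hmod]
    · rw [if_pos (by omega), if_neg (by omega), hmod]

theorem loop2_iter (map : List (List Int)) (l i : Nat) (hi : i ≤ 3) :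
    (List.range map.length).foldl (pvA_inner2 map.length l i) (st2 map l i 0) =
      st2 map l i map.length := by
  rw [List.range_eq_range']
  suffices h : ∀ c j, j + c = map.length →
      (List.range' j c).foldl (pvA_inner2 map.length l i) (st2 map l i j) = st2 map l i map.length by
    exact h map.length 0 (by omega)
  intro c
  induction c with
  | zero => intro j hjc; rw [show j = map.length from by omega]; rfl
  | succ c ih =>
    intro j hjc
    rw [List.range'_succ, List.foldl_cons, st2_step map l i j hi (by omega)]
    exact ih (j+1) (by omega)

theorem st12_trans (map : List (List Int)) (l : Nat) : st1 map 3 map.length = st2 map l 0 0 := by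
  unfold st1 st2 bf1 bf2
  simp only [List.take_length, List.drop_length, List.take_zero, List.drop_zero,
    List.map_nil, List.append_nil, List.nil_append]
  conv_rhs => rw [catB_concat]
  have h1 : (catB 0 (3+1) fun k => List.map (seg k (3+2-k)) map) =
      (catB 0 4 fun m => List.map (fun r => seg m (5-m) r ++ tcat l r (min 0 m)) map) := by
    apply catB_congr
    intro k _ hk
    apply List.map_congr_left
    intro r _
    rw [show min 0 k = 0 from by omega, show (5:Nat)-k = 3+2-k from by omega]
    simp [tcat]
  rw [h1]
  congr 1
  apply List.map_congr_left
  intro r _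
  rw [show min 0 (0+4) = 0 from by omega, show (5:Nat)-(0+4) = 1 from by omega]
  simp [tcat]

theorem st2_trans (map : List (List Int)) (l i : Nat) :
    st2 map l i map.length = st2 map l (i+1) 0 := by
  unfold st2 bf2
  apply catB_congr
  intro m _ hm5
  simp only [List.take_length, List.drop_length, List.take_zero, List.drop_zero,
    List.map_nil, List.append_nil, List.nil_append]
  apply List.map_congr_left
  intro r _
  by_cases hm : i+1 ≤ m
  · rw [if_pos hm, show min i m + 1 = min (i+1) m from by omega]
  · rw [if_neg hm, Nat.add_zero, show min i m = min (i+1) m from by omega]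

theorem st2_final (map : List (List Int)) (l : Nat) :
    st2 map l 4 0 = catB 0 5 (fun m => map.map (fun r => seg m (5-m) r ++ tcat l r m)) := by
  unfold st2 bf2
  apply catB_congr
  intro m _ hm5
  simp only [List.take_zero, List.drop_zero, List.map_nil, List.nil_append]
  apply List.map_congr_left
  intro r _
  rw [show min 4 m = m from by omega]

theorem tiles_fold (r : List Int) :
    (List.range 4).foldl (fun (p : List (List Int) × List Int) _ =>
        let t := p.2.map (fun v => PySem.Int.mod v 9 + 1)
        (p.1 ++ [t], t)) ([r], r) =
      ([gIter 0 r, gIter 1 r, gIter 2 r, gIter 3 r, gIter 4 r], gIter 4 r) := rfl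

theorem tails_fold (l : Nat) (r : List Int) :
    (List.range 4).foldl (fun (p : List (List Int) × List Int) _ =>
        let nl := (PySem.List.slice p.2 (some (0 - (l:Int))) none).map
          (fun v => PySem.Int.mod v 9 + 1)
        (p.1 ++ [nl], p.2 ++ nl)) (([] : List (List Int)), gIter 4 r) =
      ([nlF l r 0, nlF l r 1, nlF l r 2, nlF l r 3], sIter l r 4) := rfl

-- B's row equals the block-m row of the final buffer (m = 0..4)
theorem rowB_eq (l m : Nat) (hm : m < 5) (r : List Int) :
    pvB_row l m r = seg m (5-m) r ++ tcat l r m := by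
  unfold pvB_row
  simp only [List.map_id']
  rw [tiles_fold r, tails_fold l r]
  interval_cases m <;>
  · rw [PySem.List.slice_from_natCast, PySem.List.slice_to_natCast]
    simp [seg, tcat, nlF, List.range', List.range_succ, List.append_assoc]

theorem B_eq (map : List (List Int)) :
    getFullMap_alt map = catB 0 5 (fun m => map.map (fun r =>
      seg m (5-m) r ++ tcat (PySem.List.pyGetD map 0 ([] : List Int)).length r m)) := by
  unfold getFullMap_alt
  have h1 : ∀ (out : List (List Int)) lv m,
      map.foldl (fun out row => out ++ [pvB_row lv m row]) out = out ++ map.map (pvB_row lv m) :=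
    fun out lv m => PySem.List.foldl_append_singleton_eq_map _ _ _
  simp only [h1]
  rw [PySem.List.foldl_append_eq_flatMap
    (fun m => map.map (pvB_row (PySem.List.pyGetD map 0 ([] : List Int)).length m)) (List.range 5) []]
  rw [List.nil_append, List.flatMap_def, catB, ← List.range_eq_range']
  congr 1
  apply List.map_congr_left
  intro m hm
  apply List.map_congr_left
  intro r _
  exact rowB_eq _ m (List.mem_range.mp hm) r

-- ===== VERDICT (by name: the statement is the Claim_ definition above) =====
theorem getFullMap_spec : Claim_equal_getFullMap := by
  intro map _ hne
  unfold Spec_getFullMap getFullMap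
  simp only []
  rw [PySem.List.foldl_append_singleton_eq_map, List.nil_append]
  rw [show List.map (List.map (fun (num : Int) => num)) map = map from by simp]
  rw [show List.range 4 = [0,1,2,3] from rfl]
  simp only [List.foldl_cons, List.foldl_nil]
  have e1 : List.foldl (pvA_inner1 map.length 0) map (List.range map.length) = st1 map 1 0 := by
    have h0 := loop1_iter map 0
    rw [st1_init map] at h0
    rw [h0, st1_trans map 0]
  rw [e1, loop1_iter map 1, st1_trans map 1,
    loop1_iter map 2, st1_trans map 2, loop1_iter map 3, st12_trans map _,
    loop2_iter map _ 0 (by omega), st2_trans map _ 0,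
    loop2_iter map _ 1 (by omega), st2_trans map _ 1,
    loop2_iter map _ 2 (by omega), st2_trans map _ 2,
    loop2_iter map _ 3 (by omega), st2_trans map _ 3,
    st2_final map _, B_eq map]
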